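-- pv_equiv track=rewrite | github.com/Goldenstar2660/easygrant-public | backend/src/utils/paragraph_lock.py | merge_paragraphs_with_locks
-- ===== SOURCE A (Python) =====
-- from typing import List, Tuple
--
-- def split_into_paragraphs(text: str) -> List[str]:
--     """Split text into paragraphs using double newline separator.
--
--     Args:
--         text: Input text
--
--     Returns:
--         List of paragraph strings (stripped, non-empty)
--     """
--     if not text:
--         return []
--
--     # Split on double newline (paragraph separator)
--     paragraphs = text.split('\n\n')
--
--     # Filter empty paragraphs and strip whitespace
--     return [p.strip() for p in paragraphs if p.strip()]
--
-- def merge_paragraphs_with_locks(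
--     new_text: str,
--     locked_paragraphs: List[Tuple[int, str]]
-- ) -> str:
--     """Merge new generated text with locked paragraphs.
--
--     Args:
--         new_text: Newly generated text
--         locked_paragraphs: List of (index, text) tuples for locked paragraphs
--
--     Returns:
--         Merged text with locked paragraphs preserved in their original positions
--     """
--     if not locked_paragraphs:
--         return new_text
--
--     new_paragraphs = split_into_paragraphs(new_text)
--
--     # Create dict of locked paragraphs by index
--     locked_dict = {idx: text for idx, text in locked_paragraphs}
--
--     # Determine max index needed
--     max_idx = max(
--         len(new_paragraphs) - 1,
--         max(locked_dict.keys(), default=-1)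
--     )
--
--     # Merge: use locked text where available, otherwise use new text
--     merged_paragraphs = []
--     for i in range(max_idx + 1):
--         if i in locked_dict:
--             # Use locked paragraph
--             merged_paragraphs.append(locked_dict[i])
--         elif i < len(new_paragraphs):
--             # Use new AI-generated paragraph
--             merged_paragraphs.append(new_paragraphs[i])
--         # If index is beyond both, skip (shouldn't happen normally)
--
--     return '\n\n'.join(merged_paragraphs)
-- ===== SOURCE B (Python) =====
-- from typing import List, Tuple
--
-- def split_into_paragraphs(text: str) -> List[str]:
--     if not text:
--         return []
--     paragraphs = text.split('\n\n')
--     return [p.strip() for p in paragraphs if p.strip()]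
--
-- def merge_paragraphs_with_locks(
--     new_text: str,
--     locked_paragraphs: List[Tuple[int, str]]
-- ) -> str:
--     if not locked_paragraphs:
--         return new_text
--     new_paragraphs = split_into_paragraphs(new_text)
--     # Deduplicate lock entries (last one per index wins; negative indices can
--     # never be emitted), then sweep once: emit runs of new paragraphs between
--     # consecutive locked positions via slices -- no per-index membership tests.
--     locks = sorted({i: t for i, t in locked_paragraphs if i >= 0}.items(),
--                    key=lambda p: p[0])
--     out = []
--     pos = 0
--     for idx, text in locks:
--         out.extend(new_paragraphs[pos:idx])
--         out.append(text)
--         pos = idx + 1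
--     out.extend(new_paragraphs[pos:])
--     return '\n\n'.join(out)
-- ===== Notes on version B (the rewrite author's own statement) =====
-- stated objective: alternative
-- what changed: Replaces A's dense scan over range(max_idx+1) with per-index dict membership tests by a sort-and-sweep: lock entries are deduplicated and sorted by index, then one pass emits the slice of new paragraphs between consecutive locked positions and the locked text, with a final tail slice; new paragraphs never enter a table and no max index is computed.
import Mathlib
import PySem

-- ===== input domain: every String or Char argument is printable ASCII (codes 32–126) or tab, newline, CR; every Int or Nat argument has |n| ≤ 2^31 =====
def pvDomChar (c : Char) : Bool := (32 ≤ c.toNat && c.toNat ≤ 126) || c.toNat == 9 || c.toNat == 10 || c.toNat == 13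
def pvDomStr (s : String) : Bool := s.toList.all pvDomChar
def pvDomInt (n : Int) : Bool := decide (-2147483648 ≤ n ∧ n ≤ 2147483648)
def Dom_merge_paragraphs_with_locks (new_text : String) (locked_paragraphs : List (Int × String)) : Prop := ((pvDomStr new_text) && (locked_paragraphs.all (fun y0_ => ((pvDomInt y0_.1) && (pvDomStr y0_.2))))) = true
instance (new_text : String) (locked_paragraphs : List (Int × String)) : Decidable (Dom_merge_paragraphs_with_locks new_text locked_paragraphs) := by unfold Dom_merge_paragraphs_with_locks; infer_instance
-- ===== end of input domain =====

-- B replaces A's dense range(max_idx+1) scan with per-index dict membership tests by a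
-- sort-and-sweep over the deduplicated, sorted lock entries, emitting slices of the new
-- paragraphs between consecutive locked positions; objective: alternative, same result.

-- ===== PORT A =====
-- shared module helper (identical in Source A and Source B)
def split_into_paragraphs (text : String) : List String :=
  if text = "" then []
  else
    let paragraphs := (PySem.Str.split? text "\n\n").getD []   -- sep ≠ "": split? is some
    (paragraphs.filter (fun p => !(PySem.Str.strip p == ""))).map (fun p => PySem.Str.strip p)

def merge_paragraphs_with_locks (new_text : String) (locked_paragraphs : List (Int × String)) : String :=
  if locked_paragraphs = [] then new_text
  else
    let new_paragraphs := split_into_paragraphs new_text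
    let locked_dict : PySem.Dict Int String :=
      locked_paragraphs.foldl (fun d p => d.insert p.1 p.2) PySem.Dict.empty
    let max_idx : Int :=
      max (PySem.List.len new_paragraphs - 1) (PySem.List.maxD locked_dict.keys (fun k => k) (-1))
    let merged : List String :=
      (PySem.List.pyRange 0 (max_idx + 1) 1).foldl (fun acc i =>
        if locked_dict.contains i then acc ++ [locked_dict.getD i ""]
        else if i < PySem.List.len new_paragraphs then acc ++ [PySem.List.pyGetD new_paragraphs i ""]
        else acc) []
    PySem.Str.join "\n\n" merged

-- ===== PORT B =====
def merge_paragraphs_with_locks_alt (new_text : String) (locked_paragraphs : List (Int × String)) : String :=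
  if locked_paragraphs = [] then new_text
  else
    let new_paragraphs := split_into_paragraphs new_text
    -- sorted({i: t for i, t in locked_paragraphs if i >= 0}.items(), key=fst)
    let locks : List (Int × String) :=
      PySem.List.sorted
        ((locked_paragraphs.filter (fun p => decide (0 ≤ p.1))).foldl
          (fun d p => d.insert p.1 p.2) (PySem.Dict.empty : PySem.Dict Int String)).items
        (fun p => p.1)
    -- the sweep: state (out, pos); out += new_paragraphs[pos:idx]; out += [text]; pos = idx+1
    let st : List String × Int :=
      locks.foldl (fun st p =>
        (st.1 ++ PySem.List.slice new_paragraphs (some st.2) (some p.1) ++ [p.2], p.1 + 1))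
        ([], 0)
    PySem.Str.join "\n\n" (st.1 ++ PySem.List.slice new_paragraphs (some st.2) none)

-- ===== PRECONDITION & SPEC =====
def Spec_merge_paragraphs_with_locks (new_text : String) (locked_paragraphs : List (Int × String)) (out : String) : Prop := out = merge_paragraphs_with_locks_alt new_text locked_paragraphs
instance (new_text : String) (locked_paragraphs : List (Int × String)) (out : String) : Decidable (Spec_merge_paragraphs_with_locks new_text locked_paragraphs out) := by unfold Spec_merge_paragraphs_with_locks; infer_instance

-- ===== CLAIM (what is proved, stated in full; the proofs are below) =====
def Claim_equal_merge_paragraphs_with_locks : Prop := ∀ (new_text : String) (locked_paragraphs : List (Int × String)), Dom_merge_paragraphs_with_locks new_text locked_paragraphs → Spec_merge_paragraphs_with_locks new_text locked_paragraphs (merge_paragraphs_with_locks new_text locked_paragraphs)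

-- ===== LEMMAS AND PROOFS =====

-- A's merge loop as a filtered map over the index range
theorem pv_foldl_merge_eq (l : List Int) (c1 : Int → Bool) (nn : Int) (v1 v2 : Int → String)
    (acc : List String) :
    l.foldl (fun acc i =>
        if c1 i then acc ++ [v1 i] else if i < nn then acc ++ [v2 i] else acc) acc
      = acc ++ (l.filter (fun i => c1 i || decide (i < nn))).map
          (fun i => if c1 i then v1 i else v2 i) := by
  induction l generalizing acc with
  | nil => simp
  | cons x t ih =>
    simp only [List.foldl_cons, List.filter_cons]
    by_cases h1 : c1 x = true
    · simp [h1, ih]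
    · by_cases h2 : x < nn
      · simp [h1, h2, ih]
      · simp [h1, h2, ih]

-- lookup in a fold of inserts: the fold part wins, else the base dict
theorem pv_get?_foldl_insert (L : List (Int × String)) (b : PySem.Dict Int String) (k : Int) :
    (L.foldl (fun d p => d.insert p.1 p.2) b).get? k =
      match (L.foldl (fun d p => d.insert p.1 p.2) PySem.Dict.empty).get? k with
      | some v => some v
      | none => b.get? k := by
  induction L generalizing b with
  | nil => simp [PySem.Dict.get?_empty]
  | cons p t ih =>
    simp only [List.foldl_cons]
    rw [ih (b.insert p.1 p.2), ih (PySem.Dict.empty.insert p.1 p.2)]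
    cases h : (t.foldl (fun d p => d.insert p.1 p.2) PySem.Dict.empty).get? k with
    | some v => simp
    | none =>
      simp only [PySem.Dict.get?_insert, PySem.Dict.get?_empty]
      by_cases hk : k = p.1 <;> simp [hk]

-- dropping filtered-out entries does not change the lookup at a key the filter keeps
theorem pv_get?_foldl_filter (L : List (Int × String)) (q : Int × String → Bool)
    (b : PySem.Dict Int String) (k : Int) (hq : ∀ p ∈ L, p.1 = k → q p = true) :
    ((L.filter q).foldl (fun d p => d.insert p.1 p.2) b).get? k
      = (L.foldl (fun d p => d.insert p.1 p.2) b).get? k := by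
  induction L generalizing b with
  | nil => simp
  | cons p t ih =>
    simp only [List.filter_cons]
    by_cases hp : q p = true
    · simp only [hp, if_pos, List.foldl_cons]
      exact ih (b.insert p.1 p.2) (fun r hr => hq r (List.mem_cons_of_mem p hr))
    · have hne : k ≠ p.1 := by
        intro h
        exact hp (hq p (List.mem_cons_self) h.symm)
      simp only [hp, if_neg, List.foldl_cons, Bool.false_eq_true, not_false_iff]
      rw [ih b (fun r hr => hq r (List.mem_cons_of_mem p hr)),
          pv_get?_foldl_insert t b k, pv_get?_foldl_insert t (b.insert p.1 p.2) k]
      cases (t.foldl (fun d p => d.insert p.1 p.2) PySem.Dict.empty).get? k with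
      | some v => rfl
      | none => simp [PySem.Dict.get?_insert_of_ne _ _ hne]

-- enumerate-fold dict facts
theorem pv_d0_items (N : List String) :
    ((PySem.List.enumerate N).foldl (fun d p => d.insert p.1 p.2)
        (PySem.Dict.empty : PySem.Dict Int String)).items = PySem.List.enumerate N 0 := by
  have h := PySem.Dict.items_foldl_insert_fresh (l := PySem.List.enumerate N 0)
    (k := fun p => p.1) (v := fun p => p.2) (d := PySem.Dict.empty)
    (by intro a _; simp [PySem.Dict.contains_empty])
    (by rw [PySem.List.map_fst_enumerate]; exact PySem.List.nodup_pyRange_one _ _)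
  simpa using h

theorem pv_d0_keys (N : List String) :
    ((PySem.List.enumerate N).foldl (fun d p => d.insert p.1 p.2)
        (PySem.Dict.empty : PySem.Dict Int String)).keys = PySem.List.pyRange 0 (N.length : Int) 1 := by
  show ((PySem.List.enumerate N).foldl (fun d p => d.insert p.1 p.2)
        (PySem.Dict.empty : PySem.Dict Int String)).items.map (fun p => p.1) = _
  rw [pv_d0_items, PySem.List.map_fst_enumerate]
  norm_num

theorem pv_d0_getD (N : List String) (j : Nat) (hj : j < N.length) :
    ((PySem.List.enumerate N).foldl (fun d p => d.insert p.1 p.2)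
        (PySem.Dict.empty : PySem.Dict Int String)).getD (j : Int) "" = N[j] := by
  have h_nodup0 : ((PySem.List.enumerate N).foldl (fun d p => d.insert p.1 p.2)
        (PySem.Dict.empty : PySem.Dict Int String)).keys.Nodup := by
    rw [pv_d0_keys]; exact PySem.List.nodup_pyRange_one _ _
  refine PySem.Dict.getD_of_mem_items _ ?_ h_nodup0 ""
  rw [pv_d0_items, PySem.List.mem_enumerate_iff]
  exact ⟨j, hj, by simp⟩

-- membership in the plain lock-dict
theorem pv_d_mem (L : List (Int × String)) (i : Int) :
    ((L.foldl (fun d p => d.insert p.1 p.2) (PySem.Dict.empty : PySem.Dict Int String)).contains i = true)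
      ↔ i ∈ L.map (fun p => p.1) := by
  have h := PySem.Dict.keys_foldl_insert_key (l := L) (key := fun p => p.1)
    (f := fun d p => p.2) (d := (PySem.Dict.empty : PySem.Dict Int String))
  rw [PySem.Dict.contains_eq_decide_mem_keys, h]
  simp [PySem.Dict.keys_empty, PySem.Set.update_nil_left, PySem.Set.mem_ofList]

-- membership in the overlay dict R = locks over enumerated new paragraphs
theorem pv_R_mem_keys (N : List String) (L : List (Int × String)) (i : Int) :
    i ∈ (L.foldl (fun d p => d.insert p.1 p.2)
        ((PySem.List.enumerate N).foldl (fun d p => d.insert p.1 p.2)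
          (PySem.Dict.empty : PySem.Dict Int String))).keys
      ↔ ((0 ≤ i ∧ i < (N.length : Int)) ∨ i ∈ L.map (fun p => p.1)) := by
  have h := PySem.Dict.keys_foldl_insert_key (l := L) (key := fun p => p.1)
    (f := fun d p => p.2)
    (d := (PySem.List.enumerate N).foldl (fun d p => d.insert p.1 p.2)
          (PySem.Dict.empty : PySem.Dict Int String))
  rw [h, PySem.Set.mem_update, pv_d0_keys, PySem.List.mem_pyRange_one]

theorem pv_R_nodup_keys (N : List String) (L : List (Int × String)) :
    (L.foldl (fun d p => d.insert p.1 p.2)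
        ((PySem.List.enumerate N).foldl (fun d p => d.insert p.1 p.2)
          (PySem.Dict.empty : PySem.Dict Int String))).keys.Nodup := by
  refine PySem.Dict.nodup_keys_foldl_insert_key L (fun p => p.1) (fun d p => p.2) _ ?_
  rw [pv_d0_keys]; exact PySem.List.nodup_pyRange_one _ _

-- value of R at a key the lock-dict holds / does not hold
theorem pv_R_get?_con (N : List String) (L : List (Int × String)) (i : Int)
    (hc : (L.foldl (fun d p => d.insert p.1 p.2) (PySem.Dict.empty : PySem.Dict Int String)).get? i
            = some v) :
    (L.foldl (fun d p => d.insert p.1 p.2)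
        ((PySem.List.enumerate N).foldl (fun d p => d.insert p.1 p.2)
          (PySem.Dict.empty : PySem.Dict Int String))).get? i = some v := by
  rw [pv_get?_foldl_insert, hc]

theorem pv_R_getD_ncon (N : List String) (L : List (Int × String)) (i : Int)
    (hc : (L.foldl (fun d p => d.insert p.1 p.2) (PySem.Dict.empty : PySem.Dict Int String)).contains i = false)
    (h0 : 0 ≤ i) (hn : i < (N.length : Int)) :
    (L.foldl (fun d p => d.insert p.1 p.2)
        ((PySem.List.enumerate N).foldl (fun d p => d.insert p.1 p.2)
          (PySem.Dict.empty : PySem.Dict Int String))).getD i "" = PySem.List.pyGetD N i "" := by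
  rw [PySem.Dict.contains_eq_isSome_get?] at hc
  rw [PySem.Dict.getD_eq_get?_getD, pv_get?_foldl_insert]
  cases h : (L.foldl (fun d p => d.insert p.1 p.2) (PySem.Dict.empty : PySem.Dict Int String)).get? i with
  | some w => rw [h] at hc; simp at hc
  | none =>
    simp only
    rw [← PySem.Dict.getD_eq_get?_getD]
    have hj : i.toNat < N.length := by omega
    rw [PySem.List.pyGetD_eq_getElem N "" h0 (by simpa [PySem.List.len_eq] using hn)]
    have := pv_d0_getD N i.toNat hj
    rwa [show ((i.toNat : Int)) = i by omega] at this

-- A equals the overlay dict emitted at its sorted non-negative keys (proved in the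
-- previous step of this development; reused as the common normal form)
theorem pv_else (N : List String) (L : List (Int × String)) :
    ((PySem.List.pyRange 0
        (max (PySem.List.len N - 1)
            (PySem.List.maxD (L.foldl (fun d p => d.insert p.1 p.2) (PySem.Dict.empty : PySem.Dict Int String)).keys (fun k => k) (-1)) + 1) 1).foldl
      (fun acc i =>
        if (L.foldl (fun d p => d.insert p.1 p.2) (PySem.Dict.empty : PySem.Dict Int String)).contains i then
          acc ++ [(L.foldl (fun d p => d.insert p.1 p.2) (PySem.Dict.empty : PySem.Dict Int String)).getD i ""]
        else if i < PySem.List.len N then acc ++ [PySem.List.pyGetD N i ""] else acc) [])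
    =
    (((PySem.List.sorted (L.foldl (fun d p => d.insert p.1 p.2)
          ((PySem.List.enumerate N).foldl (fun d p => d.insert p.1 p.2) (PySem.Dict.empty : PySem.Dict Int String))).keys (fun k => k)).filter
        (fun i => decide (0 ≤ i))).map
      (fun i => (L.foldl (fun d p => d.insert p.1 p.2)
          ((PySem.List.enumerate N).foldl (fun d p => d.insert p.1 p.2) (PySem.Dict.empty : PySem.Dict Int String))).getD i "")) := by
  set d := L.foldl (fun d p => d.insert p.1 p.2) (PySem.Dict.empty : PySem.Dict Int String) with hd
  set d0 := (PySem.List.enumerate N).foldl (fun d p => d.insert p.1 p.2) (PySem.Dict.empty : PySem.Dict Int String) with hd0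
  set R := L.foldl (fun d p => d.insert p.1 p.2) d0 with hR
  set M : Int := max (PySem.List.len N - 1) (PySem.List.maxD d.keys (fun k => k) (-1)) with hM
  have h_keysd : d.keys = PySem.Set.ofList (L.map (fun p => p.1)) := by
    have h := PySem.Dict.keys_foldl_insert_key (l := L) (key := fun p => p.1)
      (f := fun d p => p.2) (d := (PySem.Dict.empty : PySem.Dict Int String))
    simpa [hd, PySem.Dict.keys_empty, PySem.Set.update_nil_left] using h
  have h_memd : ∀ i : Int, (d.contains i = true) ↔ i ∈ L.map (fun p => p.1) := fun i => pv_d_mem L i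
  have h_nodupR : R.keys.Nodup := pv_R_nodup_keys N L
  have h_memR : ∀ i : Int, i ∈ R.keys ↔ ((0 ≤ i ∧ i < (N.length : Int)) ∨ i ∈ L.map (fun p => p.1)) :=
    fun i => pv_R_mem_keys N L i
  have h_getR_con : ∀ i : Int, d.contains i = true → R.getD i "" = d.getD i "" := by
    intro i hc
    rw [PySem.Dict.contains_eq_isSome_get?] at hc
    cases h : d.get? i with
    | some v =>
      rw [PySem.Dict.getD_eq_get?_getD, PySem.Dict.getD_eq_get?_getD, h,
          pv_R_get?_con N L i (hd ▸ h)]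
    | none => rw [h] at hc; simp at hc
  have h_getR_ncon : ∀ i : Int, d.contains i = false → 0 ≤ i → i < (N.length : Int) →
      R.getD i "" = PySem.List.pyGetD N i "" := fun i hc h0 hn => pv_R_getD_ncon N L i hc h0 hn
  rw [pv_foldl_merge_eq]
  rw [List.nil_append]
  have h_keys_eq : ((PySem.List.pyRange 0 (M + 1) 1).filter
        (fun i => d.contains i || decide (i < PySem.List.len N)))
      = (PySem.List.sorted R.keys (fun k => k)).filter (fun i => decide (0 ≤ i)) := by
    have hmem : ∀ i : Int,
        (i ∈ (PySem.List.pyRange 0 (M + 1) 1).filter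
          (fun i => d.contains i || decide (i < PySem.List.len N)))
        ↔ (i ∈ (PySem.List.sorted R.keys (fun k => k)).filter (fun i => decide (0 ≤ i))) := by
      intro i
      simp only [List.mem_filter, PySem.List.mem_pyRange_one, PySem.List.mem_sorted,
        Bool.or_eq_true, decide_eq_true_eq, h_memR, PySem.List.len_eq]
      constructor
      · rintro ⟨⟨h0, _⟩, hc⟩
        refine ⟨?_, h0⟩
        cases hc with
        | inl hc => exact Or.inr ((h_memd i).mp hc)
        | inr hn => exact Or.inl ⟨h0, hn⟩
      · rintro ⟨hk, h0⟩
        refine ⟨⟨h0, ?_⟩, ?_⟩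
        · cases hk with
          | inl hn =>
            have : i ≤ PySem.List.len N - 1 := by
              simp only [PySem.List.len_eq]; omega
            calc i ≤ PySem.List.len N - 1 := this
              _ ≤ M := by rw [hM]; exact le_max_left _ _
              _ < M + 1 := by omega
          | inr hm =>
            have hik : i ∈ d.keys := by
              rw [h_keysd]; exact (PySem.Set.mem_ofList _ _).mpr hm
            have : i ≤ PySem.List.maxD d.keys (fun k => k) (-1) :=
              PySem.List.le_maxD_id d.keys (-1) i hik
            have : i ≤ M := le_trans this (by rw [hM]; exact le_max_right _ _)
            omega
        · cases hk with
          | inl hn => exact Or.inr hn.2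
          | inr hm => exact Or.inl ((h_memd i).mpr hm)
    have hnd1 : ((PySem.List.pyRange 0 (M + 1) 1).filter
        (fun i => d.contains i || decide (i < PySem.List.len N))).Nodup :=
      (PySem.List.nodup_pyRange_one _ _).filter _
    have hnd2 : ((PySem.List.sorted R.keys (fun k => k)).filter (fun i => decide (0 ≤ i))).Nodup :=
      ((PySem.List.sorted_perm R.keys (fun k => k) false).symm.nodup h_nodupR).filter _
    have hperm := (List.perm_ext_iff_of_nodup hnd1 hnd2).mpr hmem
    have hp1 : List.Pairwise (· < ·) ((PySem.List.pyRange 0 (M + 1) 1).filter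
        (fun i => d.contains i || decide (i < PySem.List.len N))) :=
      (PySem.List.pairwise_lt_pyRange_one _ _).filter _
    have hp2 : List.Pairwise (· < ·)
        ((PySem.List.sorted R.keys (fun k => k)).filter (fun i => decide (0 ≤ i))) := by
      have hle := PySem.List.sorted_pairwise R.keys (fun k => k)
      have hne : ((PySem.List.sorted R.keys (fun k => k))).Nodup :=
        (PySem.List.sorted_perm R.keys (fun k => k) false).symm.nodup h_nodupR
      have := (hle.and hne).imp (fun {a b} h => lt_of_le_of_ne h.1 h.2)
      exact this.filter _
    exact List.Perm.eq_of_pairwise (fun a b _ _ h1 h2 => absurd h1 (lt_asymm h2)) hp1 hp2 hperm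
  rw [h_keys_eq]
  apply List.map_congr_left
  intro i hi
  simp only [List.mem_filter, PySem.List.mem_sorted, decide_eq_true_eq] at hi
  obtain ⟨hik, h0⟩ := hi
  by_cases hc : d.contains i = true
  · rw [if_pos hc, h_getR_con i hc]
  · have hcf : d.contains i = false := by simpa using hc
    rw [if_neg hc]
    have hin : 0 ≤ i ∧ i < (N.length : Int) := by
      rcases (h_memR i).mp hik with h | h
      · exact h
      · exact absurd ((h_memd i).mpr h) hc
    rw [h_getR_ncon i hcf hin.1 hin.2]

-- ====== B side ======

-- the sweep unrolled: runs of new paragraphs between locked positions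
def pvRun (N : List String) : List (Int × String) → Int → List String
  | [], pos => PySem.List.slice N (some pos) none
  | (idx, t) :: K, pos =>
      PySem.List.slice N (some pos) (some idx) ++ [t] ++ pvRun N K (idx + 1)

-- the indices the sweep emits, in order
def pvIdx (n : Int) : List (Int × String) → Int → List Int
  | [], pos => PySem.List.pyRange pos n 1
  | (idx, _) :: K, pos =>
      PySem.List.pyRange pos (min idx n) 1 ++ [idx] ++ pvIdx n K (idx + 1)

-- B's foldl is pvRun
theorem pv_fold_run (N : List String) (K : List (Int × String)) :
    ∀ (acc : List String) (pos : Int),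
    (K.foldl (fun st p =>
        (st.1 ++ PySem.List.slice N (some st.2) (some p.1) ++ [p.2], p.1 + 1)) (acc, pos)).1
      ++ PySem.List.slice N
          (some (K.foldl (fun st p =>
            (st.1 ++ PySem.List.slice N (some st.2) (some p.1) ++ [p.2], p.1 + 1)) (acc, pos)).2) none
      = acc ++ pvRun N K pos := by
  induction K with
  | nil => intro acc pos; simp [pvRun]
  | cons p K ih =>
    intro acc pos
    obtain ⟨idx, t⟩ := p
    simp only [List.foldl_cons, pvRun]
    rw [ih]
    simp [List.append_assoc]

-- a bounded nonnegative slice is the map of pyGetD over its index range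
theorem pv_slice_map (N : List String) (a b : Int) (ha : 0 ≤ a) (hb : 0 ≤ b) :
    PySem.List.slice N (some a) (some b)
      = (PySem.List.pyRange a (min b (N.length : Int)) 1).map (fun j => PySem.List.pyGetD N j "") := by
  rw [PySem.List.slice_toNat N ha hb, PySem.List.pyRange_one]
  apply List.ext_getElem?
  intro k
  simp only [List.getElem?_take, List.getElem?_drop, List.map_map, List.getElem?_map]
  by_cases hk : k < (min b (N.length : Int) - a).toNat
  · have hk2 : (k : Int) < min b (N.length : Int) - a := Int.lt_toNat.mp hk
    rw [List.getElem?_range hk]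
    simp only [Option.map_some, Function.comp_apply]
    have h2 : a.toNat + k < N.length := by omega
    rw [if_pos (by omega : k < b.toNat - a.toNat), List.getElem?_eq_getElem h2]
    rw [PySem.List.pyGetD_eq_getElem N "" (by omega) (by omega)]
    have hidx : (a + (k : Int)).toNat = a.toNat + k := by omega
    simp only [hidx]
  · have hk2 : min b (N.length : Int) - a ≤ (k : Int) :=
      le_trans (Int.self_le_toNat _) (by exact_mod_cast Nat.le_of_not_lt hk)
    have hr : (List.range (min b (N.length : Int) - a).toNat)[k]? = none :=
      List.getElem?_eq_none (by rw [List.length_range]; exact Nat.le_of_not_lt hk)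
    rw [hr]
    simp only [Option.map_none]
    by_cases h1 : k < b.toNat - a.toNat
    · rw [if_pos h1, List.getElem?_eq_none (by omega)]
    · rw [if_neg h1]

-- indices emitted by pvIdx
theorem pv_mem_pvIdx (N : List String) (K : List (Int × String)) :
    ∀ (pos : Int), (∀ p ∈ K, pos ≤ p.1) → List.Pairwise (fun p q => p.1 < q.1) K →
    ∀ i : Int, i ∈ pvIdx (N.length : Int) K pos
      ↔ ((pos ≤ i ∧ i < (N.length : Int)) ∨ i ∈ K.map (fun p => p.1)) := by
  induction K with
  | nil => intro pos _ _ i; simp [pvIdx, PySem.List.mem_pyRange_one]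
  | cons p K ih =>
    intro pos hge hpw i
    obtain ⟨idx, t⟩ := p
    have hposidx : pos ≤ idx := hge (idx, t) (List.mem_cons_self)
    have hge' : ∀ q ∈ K, idx + 1 ≤ q.1 := by
      intro q hq
      have := (List.pairwise_cons.mp hpw).1 q hq
      omega
    have hih := ih (idx + 1) hge' (List.pairwise_cons.mp hpw).2 i
    simp only [pvIdx, List.mem_append, PySem.List.mem_pyRange_one,
      List.map_cons, List.mem_cons, List.not_mem_nil, or_false, hih]
    constructor
    · rintro ((⟨h1, h2⟩ | h) | (⟨h1, h2⟩ | h))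
      · exact Or.inl ⟨h1, by omega⟩
      · exact Or.inr (Or.inl h)
      · exact Or.inl ⟨by omega, h2⟩
      · exact Or.inr (Or.inr h)
    · rintro (⟨h1, h2⟩ | (h | h))
      · by_cases hlt : i < idx
        · exact Or.inl (Or.inl ⟨h1, by omega⟩)
        · by_cases heq : i = idx
          · exact Or.inl (Or.inr heq)
          · exact Or.inr (Or.inl ⟨by omega, h2⟩)
      · exact Or.inl (Or.inr h)
      · exact Or.inr (Or.inr h)

theorem pv_pairwise_pvIdx (N : List String) (K : List (Int × String)) :
    ∀ (pos : Int), (∀ p ∈ K, pos ≤ p.1) → List.Pairwise (fun p q => p.1 < q.1) K →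
    List.Pairwise (· < ·) (pvIdx (N.length : Int) K pos) := by
  induction K with
  | nil => intro pos _ _; exact PySem.List.pairwise_lt_pyRange_one _ _
  | cons p K ih =>
    intro pos hge hpw
    obtain ⟨idx, t⟩ := p
    have hge' : ∀ q ∈ K, idx + 1 ≤ q.1 := by
      intro q hq
      have := (List.pairwise_cons.mp hpw).1 q hq
      omega
    have hpw' := (List.pairwise_cons.mp hpw).2
    have htail := ih (idx + 1) hge' hpw'
    have hmemtail : ∀ i ∈ pvIdx (N.length : Int) K (idx + 1), idx < i := by
      intro i hi
      rcases (pv_mem_pvIdx N K (idx + 1) hge' hpw' i).mp hi with ⟨h1, _⟩ | h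
      · omega
      · obtain ⟨q, hq, rfl⟩ := List.mem_map.mp h
        have := hge' q hq; omega
    simp only [pvIdx]
    rw [List.pairwise_append]
    refine ⟨?_, ?_, ?_⟩
    · rw [List.pairwise_append]
      refine ⟨PySem.List.pairwise_lt_pyRange_one _ _, by simp, ?_⟩
      intro a ha b hb
      rw [PySem.List.mem_pyRange_one] at ha
      rw [List.mem_singleton] at hb
      omega
    · exact htail
    · intro a ha b hb
      rcases List.mem_append.mp ha with ha | ha
      · rw [PySem.List.mem_pyRange_one] at ha
        have := hmemtail b hb; omega
      · rw [List.mem_singleton] at ha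
        subst ha
        exact hmemtail b hb

-- the sweep is the map of any agreeing valuation over its index list
theorem pv_run_map (N : List String) (f : Int → String) (K : List (Int × String)) :
    ∀ (pos : Int), 0 ≤ pos → (∀ p ∈ K, pos ≤ p.1) → List.Pairwise (fun p q => p.1 < q.1) K →
    (∀ p ∈ K, f p.1 = p.2) →
    (∀ i : Int, pos ≤ i → i < (N.length : Int) → (∀ p ∈ K, p.1 ≠ i) → f i = PySem.List.pyGetD N i "") →
    pvRun N K pos = (pvIdx (N.length : Int) K pos).map f := by
  induction K with
  | nil =>
    intro pos hpos _ _ _ hnew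
    simp only [pvRun, pvIdx]
    rw [PySem.List.slice_from N hpos]
    rw [← PySem.List.map_pyGetD_pyRange' N "" hpos]
    apply List.map_congr_left
    intro i hi
    rw [PySem.List.mem_pyRange_one] at hi
    exact (hnew i hi.1 (by simpa [PySem.List.len_eq] using hi.2) (by simp)).symm
  | cons p K ih =>
    intro pos hpos hge hpw hval hnew
    obtain ⟨idx, t⟩ := p
    have hposidx : pos ≤ idx := hge (idx, t) (List.mem_cons_self)
    have hge' : ∀ q ∈ K, idx + 1 ≤ q.1 := by
      intro q hq
      have := (List.pairwise_cons.mp hpw).1 q hq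
      omega
    simp only [pvRun, pvIdx, List.map_append]
    congr 1
    · congr 1
      · rw [pv_slice_map N pos idx hpos (by omega)]
        apply List.map_congr_left
        intro i hi
        rw [PySem.List.mem_pyRange_one] at hi
        refine (hnew i hi.1 (by omega) ?_).symm
        intro q hq
        rcases List.mem_cons.mp hq with rfl | hq
        · simp only []; omega
        · have := hge' q hq; omega
      · simp [hval (idx, t) (List.mem_cons_self)]
    · refine ih (idx + 1) (by omega) hge' (List.pairwise_cons.mp hpw).2 ?_ ?_
      · intro q hq; exact hval q (List.mem_cons_of_mem _ hq)
      · intro i h1 h2 hno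
        refine hnew i (by omega) h2 ?_
        intro q hq
        rcases List.mem_cons.mp hq with rfl | hq
        · simp only []; omega
        · exact hno q hq

-- B's else-branch equals the same normal form as A's
theorem pv_else_b (N : List String) (L : List (Int × String)) :
    (let locks : List (Int × String) :=
      PySem.List.sorted
        ((L.filter (fun p => decide (0 ≤ p.1))).foldl
          (fun d p => d.insert p.1 p.2) (PySem.Dict.empty : PySem.Dict Int String)).items
        (fun p => p.1)
     let st : List String × Int :=
      locks.foldl (fun st p =>
        (st.1 ++ PySem.List.slice N (some st.2) (some p.1) ++ [p.2], p.1 + 1))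
        ([], 0)
     st.1 ++ PySem.List.slice N (some st.2) none)
    =
    (((PySem.List.sorted (L.foldl (fun d p => d.insert p.1 p.2)
          ((PySem.List.enumerate N).foldl (fun d p => d.insert p.1 p.2) (PySem.Dict.empty : PySem.Dict Int String))).keys (fun k => k)).filter
        (fun i => decide (0 ≤ i))).map
      (fun i => (L.foldl (fun d p => d.insert p.1 p.2)
          ((PySem.List.enumerate N).foldl (fun d p => d.insert p.1 p.2) (PySem.Dict.empty : PySem.Dict Int String))).getD i "")) := by
  set q : Int × String → Bool := fun p => decide (0 ≤ p.1) with hq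
  set dF := (L.filter q).foldl (fun d p => d.insert p.1 p.2) (PySem.Dict.empty : PySem.Dict Int String) with hdF
  set locks := PySem.List.sorted dF.items (fun p => p.1) with hlocks
  set d0 := (PySem.List.enumerate N).foldl (fun d p => d.insert p.1 p.2) (PySem.Dict.empty : PySem.Dict Int String) with hd0
  set R := L.foldl (fun d p => d.insert p.1 p.2) d0 with hR
  -- dF facts
  have h_keysF : dF.keys = PySem.Set.ofList ((L.filter q).map (fun p => p.1)) := by
    have h := PySem.Dict.keys_foldl_insert_key (l := L.filter q) (key := fun p => p.1)
      (f := fun d p => p.2) (d := (PySem.Dict.empty : PySem.Dict Int String))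
    simpa [hdF, PySem.Dict.keys_empty, PySem.Set.update_nil_left] using h
  have h_nodupF : dF.keys.Nodup := by
    rw [hdF]
    refine PySem.Dict.nodup_keys_foldl_insert_key (l := L.filter q) (key := fun p => p.1)
      (f := fun d p => p.2) (d := PySem.Dict.empty) ?_
    simp [PySem.Dict.keys_empty]
  -- locks facts
  have h_perm : locks.Perm dF.items := PySem.List.sorted_perm dF.items (fun p => p.1) false
  have h_keys_items : dF.keys = dF.items.map (fun p : Int × String => p.1) := rfl
  have h_locks_keys_nodup : (locks.map (fun p : Int × String => p.1)).Nodup := by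
    refine ((h_perm.map (fun p : Int × String => p.1)).nodup_iff).mpr ?_
    rw [← h_keys_items]
    exact h_nodupF
  have h_pw : List.Pairwise (fun p q : Int × String => p.1 < q.1) locks := by
    have hle := PySem.List.sorted_pairwise dF.items (fun p => p.1)
    have hne : List.Pairwise (fun p q : Int × String => p.1 ≠ q.1) locks := by
      rw [← List.pairwise_map (f := fun p : Int × String => p.1)]
      exact h_locks_keys_nodup
    exact (hle.and hne).imp (fun {a b} h => lt_of_le_of_ne h.1 h.2)
  have h_mem_locks_key : ∀ i : Int,
      i ∈ locks.map (fun p : Int × String => p.1) ↔ (0 ≤ i ∧ i ∈ L.map (fun p : Int × String => p.1)) := by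
    intro i
    rw [List.mem_map]
    constructor
    · rintro ⟨p, hp, rfl⟩
      have hpF : p ∈ dF.items := h_perm.mem_iff.mp hp
      have : p.1 ∈ dF.keys := by
        rw [h_keys_items]
        exact List.mem_map.mpr ⟨p, hpF, rfl⟩
      rw [h_keysF, PySem.Set.mem_ofList, List.mem_map] at this
      obtain ⟨r, hr, hre⟩ := this
      rw [List.mem_filter, hq] at hr
      refine ⟨by rw [← hre]; exact of_decide_eq_true hr.2, ?_⟩
      exact List.mem_map.mpr ⟨r, hr.1, hre⟩
    · rintro ⟨h0, hmem⟩
      obtain ⟨r, hr, hre⟩ := List.mem_map.mp hmem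
      have : i ∈ dF.keys := by
        rw [h_keysF, PySem.Set.mem_ofList, List.mem_map]
        exact ⟨r, List.mem_filter.mpr ⟨hr, by rw [hq]; simp [hre, h0]⟩, hre⟩
      rw [h_keys_items] at this
      obtain ⟨p, hp, hpe⟩ := List.mem_map.mp this
      exact ⟨p, h_perm.mem_iff.mpr hp, hpe⟩
  have h_ge0 : ∀ p ∈ locks, (0 : Int) ≤ p.1 := by
    intro p hp
    have : p.1 ∈ locks.map (fun p : Int × String => p.1) := List.mem_map.mpr ⟨p, hp, rfl⟩
    exact ((h_mem_locks_key p.1).mp this).1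
  -- the valuation f = R.getD · ""
  have h_val : ∀ p ∈ locks, R.getD p.1 "" = p.2 := by
    rintro ⟨pk, pv⟩ hp
    have hpF : (pk, pv) ∈ dF.items := h_perm.mem_iff.mp hp
    have hF : dF.get? pk = some pv := PySem.Dict.get?_of_mem_items dF hpF h_nodupF
    have hge0 : (0 : Int) ≤ pk := h_ge0 (pk, pv) hp
    have hq0 : ∀ r ∈ L, r.1 = pk → q r = true := by
      intro r _ hr
      rw [hq]
      simp only [decide_eq_true_eq]
      omega
    have hd : (L.foldl (fun d p => d.insert p.1 p.2) (PySem.Dict.empty : PySem.Dict Int String)).get? pk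
        = some pv := by
      rw [← pv_get?_foldl_filter L q PySem.Dict.empty pk hq0]
      exact hF
    show R.getD pk "" = pv
    rw [PySem.Dict.getD_eq_get?_getD, hR, pv_R_get?_con N L pk hd]
    rfl
  have h_new : ∀ i : Int, (0:Int) ≤ i → i < (N.length : Int) →
      (∀ p ∈ locks, p.1 ≠ i) → R.getD i "" = PySem.List.pyGetD N i "" := by
    intro i h0 hn hno
    have hnotL : i ∉ L.map (fun p => p.1) := by
      intro hmem
      have : i ∈ locks.map (fun p : Int × String => p.1) := (h_mem_locks_key i).mpr ⟨h0, hmem⟩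
      obtain ⟨p, hp, hpe⟩ := List.mem_map.mp this
      exact hno p hp hpe
    have hc : (L.foldl (fun d p => d.insert p.1 p.2) (PySem.Dict.empty : PySem.Dict Int String)).contains i = false := by
      by_contra h
      exact hnotL ((pv_d_mem L i).mp (by simpa using h))
    exact pv_R_getD_ncon N L i hc h0 hn
  -- assemble
  show (locks.foldl (fun st p =>
        (st.1 ++ PySem.List.slice N (some st.2) (some p.1) ++ [p.2], p.1 + 1)) ([], 0)).1
      ++ PySem.List.slice N (some ((locks.foldl (fun st p =>
        (st.1 ++ PySem.List.slice N (some st.2) (some p.1) ++ [p.2], p.1 + 1)) ([], 0)).2)) none = _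
  rw [pv_fold_run N locks [] 0, List.nil_append]
  rw [pv_run_map N (fun i => R.getD i "") locks 0 le_rfl h_ge0 h_pw h_val
    (fun i h0 hn hno => h_new i h0 hn hno)]
  congr 1
  -- the index lists coincide
  have hmem : ∀ i : Int,
      i ∈ pvIdx (N.length : Int) locks 0
        ↔ i ∈ (PySem.List.sorted R.keys (fun k => k)).filter (fun i => decide (0 ≤ i)) := by
    intro i
    rw [pv_mem_pvIdx N locks 0 h_ge0 h_pw i]
    simp only [List.mem_filter, PySem.List.mem_sorted, decide_eq_true_eq]
    rw [pv_R_mem_keys N L i, h_mem_locks_key i]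
    constructor
    · rintro (⟨h0, hn⟩ | ⟨h0, hm⟩)
      · exact ⟨Or.inl ⟨h0, hn⟩, h0⟩
      · exact ⟨Or.inr hm, h0⟩
    · rintro ⟨hk, h0⟩
      cases hk with
      | inl h => exact Or.inl h
      | inr h => exact Or.inr ⟨h0, h⟩
  have hnd1 : (pvIdx (N.length : Int) locks 0).Nodup :=
    (pv_pairwise_pvIdx N locks 0 h_ge0 h_pw).imp (fun h => ne_of_lt h)
  have hnodupR : R.keys.Nodup := pv_R_nodup_keys N L
  have hnd2 : ((PySem.List.sorted R.keys (fun k => k)).filter (fun i => decide (0 ≤ i))).Nodup :=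
    ((PySem.List.sorted_perm R.keys (fun k => k) false).symm.nodup hnodupR).filter _
  have hperm := (List.perm_ext_iff_of_nodup hnd1 hnd2).mpr hmem
  have hp2 : List.Pairwise (· < ·)
      ((PySem.List.sorted R.keys (fun k => k)).filter (fun i => decide (0 ≤ i))) := by
    have hle := PySem.List.sorted_pairwise R.keys (fun k => k)
    have hne : ((PySem.List.sorted R.keys (fun k => k))).Nodup :=
      (PySem.List.sorted_perm R.keys (fun k => k) false).symm.nodup hnodupR
    have := (hle.and hne).imp (fun {a b} h => lt_of_le_of_ne h.1 h.2)
    exact this.filter _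
  exact List.Perm.eq_of_pairwise (fun a b _ _ h1 h2 => absurd h1 (lt_asymm h2))
    (pv_pairwise_pvIdx N locks 0 h_ge0 h_pw) hp2 hperm

theorem merge_core (new_text : String) (locked_paragraphs : List (Int × String)) :
    merge_paragraphs_with_locks new_text locked_paragraphs
      = merge_paragraphs_with_locks_alt new_text locked_paragraphs := by
  by_cases hL : locked_paragraphs = []
  · simp [merge_paragraphs_with_locks, merge_paragraphs_with_locks_alt, hL]
  · simp only [merge_paragraphs_with_locks, merge_paragraphs_with_locks_alt, if_neg hL]
    exact congrArg (PySem.Str.join "\n\n")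
      ((pv_else (split_into_paragraphs new_text) locked_paragraphs).trans
        (pv_else_b (split_into_paragraphs new_text) locked_paragraphs).symm)

-- ===== VERDICT (by name: the statement is the Claim_ definition above) =====
theorem merge_paragraphs_with_locks_spec : Claim_equal_merge_paragraphs_with_locks := by
  intro new_text locked_paragraphs _
  exact merge_core new_text locked_paragraphs
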